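-- pv_equiv track=rewrite | github.com/RameshKommula/datahomdelingx-AI | src/ai_agents/optimization_agent.py | _extract_performance_impact
-- ===== SOURCE A (Python) =====
-- def _extract_performance_impact(description: str) -> str:
--     """Extract expected performance impact from description."""
--     desc_lower = description.lower()
--
--     if any(term in desc_lower for term in ['significant', '50%', '2x', 'dramatic']):
--         return 'high'
--     elif any(term in desc_lower for term in ['moderate', '20%', '30%', 'noticeable']):
--         return 'medium'
--     elif any(term in desc_lower for term in ['minor', '10%', 'slight', 'small']):
--         return 'low'
--     else:
--         return 'unknown'
-- ===== SOURCE B (Python) =====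
-- _SEVERITY = {
--     'significant': 3, '50%': 3, '2x': 3, 'dramatic': 3,
--     'moderate': 2, '20%': 2, '30%': 2, 'noticeable': 2,
--     'minor': 1, '10%': 1, 'slight': 1, 'small': 1,
-- }
-- _LABEL = {3: 'high', 2: 'medium', 1: 'low', 0: 'unknown'}
--
--
-- def _extract_performance_impact(description: str) -> str:
--     """Extract expected performance impact from description."""
--     text = description.lower()
--     best = 0
--     for term, score in _SEVERITY.items():
--         if term in text and score > best:
--             best = score
--     return _LABEL[best]
-- ===== Notes on version B (the rewrite author's own statement) =====
-- stated objective: alternative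
-- what changed: Replaces the three ordered early-exit any() tiers with one flat keyword-to-score map scanned in a single pass that keeps the maximum matched score, mapped back to a label at the end.
import Mathlib
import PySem

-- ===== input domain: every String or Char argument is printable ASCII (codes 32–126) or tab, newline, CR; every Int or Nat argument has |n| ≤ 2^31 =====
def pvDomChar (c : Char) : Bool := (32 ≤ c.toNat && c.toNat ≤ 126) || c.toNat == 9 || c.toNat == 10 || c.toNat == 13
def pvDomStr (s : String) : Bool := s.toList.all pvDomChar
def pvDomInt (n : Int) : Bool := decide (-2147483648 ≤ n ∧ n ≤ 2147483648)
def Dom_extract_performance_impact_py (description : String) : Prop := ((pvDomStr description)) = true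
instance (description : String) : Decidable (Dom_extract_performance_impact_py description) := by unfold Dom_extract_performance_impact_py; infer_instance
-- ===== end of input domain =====

-- B replaces A's three ordered early-exit keyword tiers with one flat keyword→score map scanned in a single max-taking pass (objective: alternative).


-- ===== PORT A =====
def extract_performance_impact_py (description : String) : String :=
  let desc_lower := PySem.Str.lower description
  if ["significant", "50%", "2x", "dramatic"].any (fun term => PySem.Str.isIn term desc_lower) then
    "high"
  else if ["moderate", "20%", "30%", "noticeable"].any (fun term => PySem.Str.isIn term desc_lower) then
    "medium"
  else if ["minor", "10%", "slight", "small"].any (fun term => PySem.Str.isIn term desc_lower) then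
    "low"
  else
    "unknown"

-- ===== PORT B =====
def pvSeverity : List (String × Int) :=
  [("significant", 3), ("50%", 3), ("2x", 3), ("dramatic", 3),
   ("moderate", 2), ("20%", 2), ("30%", 2), ("noticeable", 2),
   ("minor", 1), ("10%", 1), ("slight", 1), ("small", 1)]

def pvLabel : PySem.Dict Int String :=
  PySem.Dict.ofList [(3, "high"), (2, "medium"), (1, "low"), (0, "unknown")]

-- _LABEL[best]: best is always one of 0..3, so the key is present and getD never uses its default
def extract_performance_impact_py_alt (description : String) : String :=
  let text := PySem.Str.lower description
  let best := pvSeverity.foldl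
    (fun best p => if PySem.Str.isIn p.1 text && decide (p.2 > best) then p.2 else best) 0
  pvLabel.getD best ""

-- ===== PRECONDITION & SPEC =====
def Spec_extract_performance_impact_py (description : String) (out : String) : Prop := out = extract_performance_impact_py_alt description
instance (description : String) (out : String) : Decidable (Spec_extract_performance_impact_py description out) := by unfold Spec_extract_performance_impact_py; infer_instance

-- ===== CLAIM (what is proved, stated in full; the proofs are below) =====
def Claim_equal_extract_performance_impact_py : Prop := ∀ (description : String), Dom_extract_performance_impact_py description → Spec_extract_performance_impact_py description (extract_performance_impact_py description)

-- ===== LEMMAS AND PROOFS =====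

-- Folding B's max-step over a group of terms that all carry the same score s:
-- the result is s if some term matches and s beats the accumulator, else the accumulator.
theorem pvGrp (ts : List String) (s : Int) (text : String) : ∀ (acc : Int),
    ((ts.map (fun t => (t, s))).foldl
      (fun best p => if PySem.Str.isIn p.1 text && decide (p.2 > best) then p.2 else best) acc)
    = if ts.any (fun t => PySem.Str.isIn t text) && decide (s > acc) then s else acc := by
  induction ts with
  | nil => intro acc; simp
  | cons t ts ih =>
    intro acc
    simp only [List.map_cons, List.foldl_cons, List.any_cons]
    rw [ih]
    rcases Bool.eq_false_or_eq_true (PySem.Chars.isIn t.toList text.toList) with h1 | h1 <;>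
      by_cases h2 : s > acc <;>
      simp [h1, h2]

-- pvSeverity splits into the three equal-score groups
theorem pvSeverity_split : pvSeverity =
    (["significant", "50%", "2x", "dramatic"].map (fun t => (t, (3 : Int))))
    ++ (["moderate", "20%", "30%", "noticeable"].map (fun t => (t, (2 : Int))))
    ++ (["minor", "10%", "slight", "small"].map (fun t => (t, (1 : Int)))) := rfl

-- ===== VERDICT (by name: the statement is the Claim_ definition above) =====

theorem extract_performance_impact_py_spec : Claim_equal_extract_performance_impact_py := by
  intro d _
  unfold Spec_extract_performance_impact_py extract_performance_impact_py extract_performance_impact_py_alt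
  rw [pvSeverity_split]
  simp only [List.foldl_append]
  rw [pvGrp, pvGrp, pvGrp]
  cases hhi : ["significant", "50%", "2x", "dramatic"].any
      (fun t => PySem.Str.isIn t (PySem.Str.lower d)) <;>
    cases hmed : ["moderate", "20%", "30%", "noticeable"].any
      (fun t => PySem.Str.isIn t (PySem.Str.lower d)) <;>
    cases hlo : ["minor", "10%", "slight", "small"].any
      (fun t => PySem.Str.isIn t (PySem.Str.lower d)) <;>
    simp [hhi, hmed, hlo] <;> rfl
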